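-- pv_equiv track=rewrite | github.com/mikebocek/python_lectures | Lesson_0_basic_python/reference_implementation.py | convert_digraphs_to_dict
-- ===== SOURCE A (Python) =====
-- def convert_digraphs_to_dict(digraphs):
--     words_with_frequencies = {}
--     for first_word, second_word in digraphs:
--         if first_word not in words_with_frequencies:
--             words_with_frequencies[first_word] = {second_word: 1}
--         elif second_word not in words_with_frequencies[first_word]:
--             words_with_frequencies[first_word][second_word] = 1
--         else:
--             words_with_frequencies[first_word][second_word] += 1
--     return words_with_frequencies
-- ===== SOURCE B (Python) =====
-- def convert_digraphs_to_dict(digraphs):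
--     counts = {}
--     for first_word, second_word in digraphs:
--         counts[(first_word, second_word)] = counts.get((first_word, second_word), 0) + 1
--     result = {}
--     for (first_word, second_word), count in counts.items():
--         inner = result.get(first_word, {})
--         inner[second_word] = count
--         result[first_word] = inner
--     return result
-- ===== Notes on version B (the rewrite author's own statement) =====
-- stated objective: alternative
-- what changed: B first accumulates a flat dict keyed by the (first, second) pair in one counting pass, then reshapes that count table into the nested dict in a second pass, instead of A's single pass that maintains nested dicts with three membership branches.
import Mathlib
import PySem

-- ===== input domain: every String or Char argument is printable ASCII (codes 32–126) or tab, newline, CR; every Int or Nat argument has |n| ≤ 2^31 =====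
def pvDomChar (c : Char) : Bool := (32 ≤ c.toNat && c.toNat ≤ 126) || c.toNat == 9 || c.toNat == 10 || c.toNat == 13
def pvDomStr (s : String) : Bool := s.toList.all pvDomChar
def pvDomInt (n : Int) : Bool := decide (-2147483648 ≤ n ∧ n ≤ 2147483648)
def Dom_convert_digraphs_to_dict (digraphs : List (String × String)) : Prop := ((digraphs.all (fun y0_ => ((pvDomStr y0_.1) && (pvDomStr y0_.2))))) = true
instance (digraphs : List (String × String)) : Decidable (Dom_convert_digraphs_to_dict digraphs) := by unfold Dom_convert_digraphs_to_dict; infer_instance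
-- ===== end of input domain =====

-- B first counts each (first, second) pair into a flat pair-keyed dict, then reshapes that
-- count table into the nested dict in a second pass (alternative decomposition, same cost).

-- ===== PORT A =====
-- one step of A's loop body (the three membership branches on the nested dict)
def cddAStep (d : PySem.Dict String (PySem.Dict String Int)) (p : String × String) :
    PySem.Dict String (PySem.Dict String Int) :=
  if d.contains p.1 = false then
    d.insert p.1 (PySem.Dict.ofList [(p.2, 1)])
  else if (d.getD p.1 PySem.Dict.empty).contains p.2 = false then
    d.insert p.1 ((d.getD p.1 PySem.Dict.empty).insert p.2 1)
  else
    d.insert p.1 ((d.getD p.1 PySem.Dict.empty).insert p.2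
      ((d.getD p.1 PySem.Dict.empty).getD p.2 0 + 1))

def convert_digraphs_to_dict (digraphs : List (String × String)) :
    List (String × List (String × Int)) :=
  (digraphs.foldl cddAStep PySem.Dict.empty).items.map (fun kv => (kv.1, kv.2.items))

-- ===== PORT B =====
-- one step of B's second loop: inner = result.get(a, {}); inner[b] = c; result[a] = inner
def cddBStep (r : PySem.Dict String (PySem.Dict String Int))
    (pc : (String × String) × Int) : PySem.Dict String (PySem.Dict String Int) :=
  r.insert pc.1.1 ((r.getD pc.1.1 PySem.Dict.empty).insert pc.1.2 pc.2)

def convert_digraphs_to_dict_alt (digraphs : List (String × String)) :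
    List (String × List (String × Int)) :=
  let counts : PySem.Dict (String × String) Int :=
    digraphs.foldl (fun c p => c.insert p (c.getD p 0 + 1)) PySem.Dict.empty
  let result : PySem.Dict String (PySem.Dict String Int) :=
    counts.items.foldl cddBStep PySem.Dict.empty
  result.items.map (fun kv => (kv.1, kv.2.items))

-- ===== PRECONDITION & SPEC =====
def Spec_convert_digraphs_to_dict (digraphs : List (String × String)) (out : List (String × List (String × Int))) : Prop := out = convert_digraphs_to_dict_alt digraphs
instance (digraphs : List (String × String)) (out : List (String × List (String × Int))) : Decidable (Spec_convert_digraphs_to_dict digraphs out) := by unfold Spec_convert_digraphs_to_dict; infer_instance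

-- ===== CLAIM (what is proved, stated in full; the proofs are below) =====
def Claim_equal_convert_digraphs_to_dict : Prop := ∀ (digraphs : List (String × String)), Dom_convert_digraphs_to_dict digraphs → Spec_convert_digraphs_to_dict digraphs (convert_digraphs_to_dict digraphs)

-- ===== LEMMAS AND PROOFS =====

-- reshape of a pair↦count table, parametrised by the count function f
def cddResh (S : List (String × String)) (f : String × String → Int) :
    PySem.Dict String (PySem.Dict String Int) :=
  (S.map (fun p => (p, f p))).foldl cddBStep PySem.Dict.empty

theorem cddResh_append (S : List (String × String)) (q : String × String)
    (f : String × String → Int) :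
    cddResh (S ++ [q]) f = cddBStep (cddResh S f) (q, f q) := by
  simp [cddResh, List.foldl_append]

theorem cddResh_contains (S : List (String × String)) (f : String × String → Int)
    (a : String) : (cddResh S f).contains a = true ↔ a ∈ S.map Prod.fst := by
  induction S using List.reverseRecOn with
  | nil => simp [cddResh, PySem.Dict.contains_empty]
  | append_singleton T q ih =>
    rw [cddResh_append, cddBStep, PySem.Dict.contains_insert]
    simp only [List.map_append, List.mem_append, List.map_cons, List.map_nil,
      List.mem_singleton, Bool.or_eq_true, beq_iff_eq, ih]
    tauto

theorem cddResh_inner_contains (S : List (String × String)) (f : String × String → Int)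
    (a b : String) :
    ((cddResh S f).getD a PySem.Dict.empty).contains b = true ↔ (a, b) ∈ S := by
  induction S using List.reverseRecOn with
  | nil => simp [cddResh, PySem.Dict.getD_empty, PySem.Dict.contains_empty]
  | append_singleton T q ih =>
    rw [cddResh_append, cddBStep]
    dsimp only
    by_cases hq : q.1 = a
    · rw [hq, PySem.Dict.getD_insert_self, PySem.Dict.contains_insert]
      simp only [List.mem_append, List.mem_singleton, Bool.or_eq_true, beq_iff_eq, ih,
        Prod.ext_iff]
      subst hq
      tauto
    · rw [PySem.Dict.getD_insert_of_ne _ _ _ (Ne.symm hq)]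
      simp only [List.mem_append, List.mem_singleton, ih, Prod.ext_iff]
      constructor
      · exact Or.inl
      · rintro (h | ⟨h1, h2⟩)
        · exact h
        · exact absurd h1.symm hq

-- general Dict fact: inserting at a contained key commutes (as items lists) with any other insert
theorem cdd_insert_comm {κ ν : Type} [BEq κ] [LawfulBEq κ] (d : PySem.Dict κ ν)
    (k k' : κ) (v v' : ν) (hne : k ≠ k') (hc : d.contains k = true) :
    (d.insert k v).insert k' v' = (d.insert k' v').insert k v := by
  apply PySem.Dict.ext
  by_cases hc' : d.contains k' = true
  · rw [PySem.Dict.items_insert_of_contains _ _ (by simp [PySem.Dict.contains_insert, hc']),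
        PySem.Dict.items_insert_of_contains _ _ hc,
        PySem.Dict.items_insert_of_contains _ _ (by simp [PySem.Dict.contains_insert, hc]),
        PySem.Dict.items_insert_of_contains _ _ hc']
    simp only [List.map_map]
    apply List.map_congr_left
    intro p _
    by_cases h1 : p.1 = k <;> by_cases h2 : p.1 = k' <;> simp_all [Function.comp]
  · have hc'' : d.contains k' = false := by simpa using hc'
    have h1 : (d.insert k v).contains k' = false := by
      simp [PySem.Dict.contains_insert, hc'', beq_eq_false_iff_ne, Ne.symm hne]
    rw [PySem.Dict.items_insert_of_not_contains _ _ h1,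
        PySem.Dict.items_insert_of_contains _ _ hc,
        PySem.Dict.items_insert_of_contains _ _ (by simp [PySem.Dict.contains_insert, hc]),
        PySem.Dict.items_insert_of_not_contains _ _ hc'',
        List.map_append]
    simp [Ne.symm hne]

theorem cddResh_congr (S : List (String × String)) (f g : String × String → Int)
    (h : ∀ p ∈ S, f p = g p) : cddResh S f = cddResh S g := by
  unfold cddResh
  rw [List.map_congr_left (fun p hp => by rw [h p hp])]

-- bumping the count of a pair already in the table = A's += branch on the reshaped dict
theorem cddResh_bump (S : List (String × String)) (f : String × String → Int)
    (p : String × String) (hnd : S.Nodup) (hp : p ∈ S) :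
    cddResh S (fun q => f q + if q = p then 1 else 0) =
      (cddResh S f).insert p.1 (((cddResh S f).getD p.1 PySem.Dict.empty).insert p.2
        (((cddResh S f).getD p.1 PySem.Dict.empty).getD p.2 0 + 1)) := by
  induction S using List.reverseRecOn generalizing f with
  | nil => cases hp
  | append_singleton T q ih =>
    have hnd' : T.Nodup ∧ q ∉ T := by
      constructor
      · exact (List.nodup_append.mp hnd).1
      · have := List.disjoint_of_nodup_append hnd
        exact fun h => this h (List.mem_singleton_self q)
    rw [cddResh_append, cddResh_append]
    by_cases hpq : p = q
    · subst hpq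
      have hTf : cddResh T (fun q => f q + if q = p then 1 else 0) = cddResh T f :=
        cddResh_congr _ _ _ (fun r hr => by
          have : r ≠ p := fun h => hnd'.2 (h ▸ hr)
          simp [this])
      rw [hTf, cddBStep, cddBStep]
      dsimp only
      rw [PySem.Dict.getD_insert_self, PySem.Dict.getD_insert_self,
          PySem.Dict.insert_insert_self, PySem.Dict.insert_insert_self]
      simp
    · have hpT : p ∈ T := by
        rcases List.mem_append.mp hp with h | h
        · exact h
        · exact absurd (List.mem_singleton.mp h) hpq
      rw [ih f hnd'.1 hpT, cddBStep, cddBStep]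
      dsimp only
      have hfq : f q + (if q = p then 1 else 0) = f q := by simp [Ne.symm hpq]
      rw [hfq]
      set r := cddResh T f with hr
      set I := r.getD p.1 PySem.Dict.empty with hI
      by_cases hq1 : q.1 = p.1
      · -- same first word, different second word
        have hb : q.2 ≠ p.2 := fun h => hpq (Prod.ext hq1.symm h.symm)
        rw [hq1, PySem.Dict.getD_insert_self, PySem.Dict.insert_insert_self,
            PySem.Dict.getD_insert_self,
            PySem.Dict.getD_insert_of_ne _ _ _ (Ne.symm hb),
            PySem.Dict.insert_insert_self]
        congr 1
        exact cdd_insert_comm I p.2 q.2 _ _ (Ne.symm hb)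
          ((cddResh_inner_contains T f p.1 p.2).mpr (by simpa using hpT))
      · have hca : r.contains p.1 = true :=
          (cddResh_contains T f p.1).mpr (List.mem_map.mpr ⟨p, hpT, rfl⟩)
        rw [PySem.Dict.getD_insert_of_ne _ _ _ hq1,
            PySem.Dict.getD_insert_of_ne _ _ _ (Ne.symm hq1)]
        exact cdd_insert_comm r p.1 q.1 _ _ (Ne.symm hq1) hca

theorem cddSet_append (t : List (String × String)) (p : String × String) :
    PySem.Set.ofList (t ++ [p]) = PySem.Set.add (PySem.Set.ofList t) p := by
  rw [PySem.Set.ofList_eq_foldl, PySem.Set.ofList_eq_foldl, List.foldl_append]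
  rfl

-- A's fold builds exactly the reshaped pair-count table
theorem cdd_main (ds : List (String × String)) :
    ds.foldl cddAStep PySem.Dict.empty =
      cddResh (PySem.Set.ofList ds) (fun q => (ds.count q : Int)) := by
  induction ds using List.reverseRecOn with
  | nil => rfl
  | append_singleton t p ih =>
    rw [List.foldl_append, List.foldl_cons, List.foldl_nil, ih, cddSet_append]
    have hcnt : ∀ q : String × String,
        ((t ++ [p]).count q : Int) = (t.count q : Int) + if q = p then 1 else 0 := by
      intro q
      rw [List.count_append, List.count_singleton]
      by_cases h : q = p
      · simp [h]
      · simp [h, Ne.symm h]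
    by_cases hp : p ∈ t
    · -- p seen before: Set unchanged, A takes the += branch, counts bump
      have hS : PySem.Set.add (PySem.Set.ofList t) p = PySem.Set.ofList t := by
        rw [PySem.Set.add, if_pos]
        rw [PySem.Set.contains, List.contains_iff_mem]
        exact (PySem.Set.mem_ofList t p).mpr hp
      rw [hS]
      have hmem : p ∈ PySem.Set.ofList t := (PySem.Set.mem_ofList t p).mpr hp
      have hresh : cddResh (PySem.Set.ofList t) (fun q => ((t ++ [p]).count q : Int)) =
          cddResh (PySem.Set.ofList t) (fun q => (t.count q : Int) + if q = p then 1 else 0) :=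
        cddResh_congr _ _ _ (fun q _ => hcnt q)
      rw [hresh, cddResh_bump _ _ _ (PySem.Set.nodup_ofList t) hmem]
      set r := cddResh (PySem.Set.ofList t) (fun q => (t.count q : Int))
      have hca : r.contains p.1 = true :=
        (cddResh_contains _ _ p.1).mpr (List.mem_map.mpr ⟨p, hmem, rfl⟩)
      have hcb : (r.getD p.1 PySem.Dict.empty).contains p.2 = true :=
        (cddResh_inner_contains _ _ p.1 p.2).mpr (by simpa using hmem)
      rw [cddAStep, hca, hcb]
      simp
    · -- fresh pair: appended to the Set with count 1
      have hS : PySem.Set.add (PySem.Set.ofList t) p = PySem.Set.ofList t ++ [p] := by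
        rw [PySem.Set.add, if_neg]
        rw [PySem.Set.contains, List.contains_iff_mem]
        exact fun h => hp ((PySem.Set.mem_ofList t p).mp h)
      rw [hS, cddResh_append]
      have hresh : cddResh (PySem.Set.ofList t) (fun q => ((t ++ [p]).count q : Int)) =
          cddResh (PySem.Set.ofList t) (fun q => (t.count q : Int)) :=
        cddResh_congr _ _ _ (fun q hq => by
          rw [hcnt q]
          have : q ≠ p := fun h => hp (h ▸ (PySem.Set.mem_ofList t q).mp hq)
          simp [this])
      have hc1 : ((t ++ [p]).count p : Int) = 1 := by
        rw [hcnt p]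
        simp [List.count_eq_zero.mpr hp]
      rw [hresh, cddBStep]
      dsimp only
      rw [hc1]
      set r := cddResh (PySem.Set.ofList t) (fun q => (t.count q : Int))
      have hpS : p ∉ PySem.Set.ofList t := fun h => hp ((PySem.Set.mem_ofList t p).mp h)
      have hcb : (r.getD p.1 PySem.Dict.empty).contains p.2 = false := by
        have := cddResh_inner_contains (PySem.Set.ofList t)
          (fun q => (t.count q : Int)) p.1 p.2
        simp only [Prod.mk.eta] at this
        by_contra h
        exact hpS (this.mp (by simpa using h))
      rw [cddAStep]
      by_cases hca : r.contains p.1 = true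
      · rw [if_neg (by simp [hca]), if_pos hcb]
      · have hca' : r.contains p.1 = false := by simpa using hca
        rw [if_pos hca']
        congr 1
        rw [PySem.Dict.getD_of_not_contains _ _ hca']
        rfl

-- ===== VERDICT (by name: the statement is the Claim_ definition above) =====
theorem convert_digraphs_to_dict_spec : Claim_equal_convert_digraphs_to_dict := by
  intro ds _
  unfold Spec_convert_digraphs_to_dict convert_digraphs_to_dict convert_digraphs_to_dict_alt
  rw [PySem.Dict.foldl_insert_getD_add_one_eq_counter]
  simp only []
  rw [PySem.Dict.items_counter, cdd_main]
  rfl
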